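-- pv_equiv track=rewrite | github.com/gaolong/RiboSuite | bin/intervals.py | subtract_intervals
-- ===== SOURCE A (Python) =====
-- from typing import List, Tuple
--
-- def merge_intervals(intervals: List[Tuple[int, int]]) -> List[Tuple[int, int]]:
--     """
--     Merge overlapping/adjacent half-open intervals.
--     """
--     if not intervals:
--         return []
--     intervals = sorted(intervals, key=lambda x: (x[0], x[1]))
--     merged = [intervals[0]]
--     for s, e in intervals[1:]:
--         ps, pe = merged[-1]
--         if s <= pe:  # overlap or adjacency
--             merged[-1] = (ps, max(pe, e))
--         else:
--             merged.append((s, e))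
--     return merged
--
-- def subtract_intervals(
--     a: List[Tuple[int, int]],
--     b: List[Tuple[int, int]],
-- ) -> List[Tuple[int, int]]:
--     """
--     Return A \ B for half-open intervals, assuming nothing about sorting.
--
--     Example:
--       A = [(0, 100)]
--       B = [(10, 20), (30, 40)]
--       -> [(0, 10), (20, 30), (40, 100)]
--     """
--     a = merge_intervals(a)
--     b = merge_intervals(b)
--
--     out: List[Tuple[int, int]] = []
--     j = 0
--     for s, e in a:
--         cur = s
--         while j < len(b) and b[j][1] <= cur:
--             j += 1
--         k = j
--         while k < len(b) and b[k][0] < e: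
--             bs, be = b[k]
--             if bs > cur:
--                 out.append((cur, min(bs, e)))
--             cur = max(cur, be)
--             if cur >= e:
--                 break
--             k += 1
--         if cur < e:
--             out.append((cur, e))
--     return out
-- ===== SOURCE B (Python) =====
-- from typing import List, Tuple
--
-- def _merge(ivs: List[Tuple[int, int]]) -> List[Tuple[int, int]]:
--     """Merge via a single 'current interval' register, emitting on each gap."""
--     out: List[Tuple[int, int]] = []
--     cur = None
--     for p in sorted(ivs):
--         if cur is None:
--             cur = p
--         elif p[0] <= cur[1]:
--             cur = (cur[0], max(cur[1], p[1]))
--         else: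
--             out.append(cur)
--             cur = p
--     if cur is not None:
--         out.append(cur)
--     return out
--
-- def _sub_one(s: int, e: int, mb: List[Tuple[int, int]]) -> List[Tuple[int, int]]:
--     """Pieces of [s, e) left after cutting with the merged list mb."""
--     i = 0
--     while i < len(mb) and mb[i][1] <= s:
--         i += 1
--     cur = s
--     out: List[Tuple[int, int]] = []
--     for bs, be in mb[i:]:
--         if cur >= e:
--             return out
--         if bs >= e:
--             break
--         if bs > cur:
--             out.append((cur, bs))
--         cur = max(cur, be)
--     if cur < e:
--         out.append((cur, e))
--     return out
--
-- def subtract_intervals(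
--     a: List[Tuple[int, int]],
--     b: List[Tuple[int, int]],
-- ) -> List[Tuple[int, int]]:
--     # One streaming pass over sorted(a): keep a 'current merged interval'
--     # register; whenever it closes, immediately emit its difference with mb.
--     mb = _merge(b)
--     out: List[Tuple[int, int]] = []
--     cur = None
--     for p in sorted(a):
--         if cur is None:
--             cur = p
--         elif p[0] <= cur[1]:
--             cur = (cur[0], max(cur[1], p[1]))
--         else:
--             out.extend(_sub_one(cur[0], cur[1], mb))
--             cur = p
--     if cur is not None:
--         out.extend(_sub_one(cur[0], cur[1], mb))
--     return out
-- ===== Notes on version B (the rewrite author's own statement) =====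
-- stated objective: alternative
-- what changed: B never builds a merged copy of `a`: it streams sorted(a) through a single current-interval register and, each time the register closes, immediately emits its difference with merged b via a pure per-interval cut-walk (prefix drop recomputed from the list head), replacing A's in-place merged[-1] updates and its stateful cross-interval j/k index pointers.
import Mathlib
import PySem

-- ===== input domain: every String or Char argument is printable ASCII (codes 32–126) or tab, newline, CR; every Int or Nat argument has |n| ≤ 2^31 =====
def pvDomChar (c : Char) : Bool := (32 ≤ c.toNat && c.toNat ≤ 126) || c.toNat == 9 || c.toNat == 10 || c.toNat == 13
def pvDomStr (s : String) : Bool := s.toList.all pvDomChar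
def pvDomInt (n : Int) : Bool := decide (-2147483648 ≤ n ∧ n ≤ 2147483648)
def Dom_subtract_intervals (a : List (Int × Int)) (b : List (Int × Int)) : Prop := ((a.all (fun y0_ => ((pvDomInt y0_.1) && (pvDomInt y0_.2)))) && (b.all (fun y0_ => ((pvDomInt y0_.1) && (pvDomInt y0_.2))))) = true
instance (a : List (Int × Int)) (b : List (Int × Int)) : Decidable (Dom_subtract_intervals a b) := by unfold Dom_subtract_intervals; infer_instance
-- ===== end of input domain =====

-- B restructures A (same values everywhere): no merged copy of `a` is built — sorted(a) streams
-- through one current-interval register whose closed intervals are immediately cut against merged b.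

-- ===== PORT A =====
-- merge_intervals: merged = [first]; for (s,e) in rest: update merged[-1] or append
def pyMergeLoop (merged : List (Int × Int)) : List (Int × Int) → List (Int × Int)
  | [] => merged
  | (s, e) :: tl =>
    let last := merged.getLastD (0, 0)
    if s ≤ last.2 then pyMergeLoop (merged.dropLast ++ [(last.1, max last.2 e)]) tl
    else pyMergeLoop (merged ++ [(s, e)]) tl

def merge_intervals (intervals : List (Int × Int)) : List (Int × Int) :=
  if intervals = [] then []
  else
    match PySem.List.sorted2 intervals (fun x => x.1) (fun x => x.2) false with
    | [] => []          -- unreachable: sorted of a nonempty list is nonempty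
    | h :: t => pyMergeLoop [h] t

-- while j < len(b) and b[j][1] <= cur: j += 1
def pyJLoop (b : List (Int × Int)) (j : Nat) (cur : Int) : Nat :=
  if j < b.length ∧ (b.getD j (0, 0)).2 ≤ cur then pyJLoop b (j + 1) cur else j
  termination_by b.length - j
  decreasing_by omega

-- the inner k-loop: returns (cur, out) as left by the loop (break included)
def pyKLoop (b : List (Int × Int)) (k : Nat) (cur e : Int) (out : List (Int × Int)) :
    Int × List (Int × Int) :=
  if k < b.length ∧ (b.getD k (0, 0)).1 < e then
    let bs := (b.getD k (0, 0)).1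
    let be := (b.getD k (0, 0)).2
    let out1 := if bs > cur then out ++ [(cur, min bs e)] else out
    let cur1 := max cur be
    if cur1 ≥ e then (cur1, out1) else pyKLoop b (k + 1) cur1 e out1
  else (cur, out)
  termination_by b.length - k
  decreasing_by omega

-- for (s, e) in a: …
def pyALoop (b : List (Int × Int)) (ar : List (Int × Int)) (j : Nat)
    (out : List (Int × Int)) : List (Int × Int) :=
  match ar with
  | [] => out
  | (s, e) :: tl =>
    let j1 := pyJLoop b j s
    let r := pyKLoop b j1 s e out
    let out1 := if r.1 < e then r.2 ++ [(r.1, e)] else r.2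
    pyALoop b tl j1 out1

def subtract_intervals (a : List (Int × Int)) (b : List (Int × Int)) : List (Int × Int) :=
  pyALoop (merge_intervals b) (merge_intervals a) 0 []

-- ===== PORT B =====
-- _merge's register loop (cur = the non-None register)
def mergeRec (cur : Int × Int) : List (Int × Int) → List (Int × Int)
  | [] => [cur]
  | p :: tl =>
    if p.1 ≤ cur.2 then mergeRec (cur.1, max cur.2 p.2) tl
    else cur :: mergeRec p tl

def merge_alt (ivs : List (Int × Int)) : List (Int × Int) :=
  match PySem.List.sorted2 ivs (fun x => x.1) (fun x => x.2) false with
  | [] => []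
  | h :: t => mergeRec h t

-- _sub_one's leading index advance + slice mb[i:]
def dropCut (s : Int) : List (Int × Int) → List (Int × Int)
  | [] => []
  | p :: tl => if p.2 ≤ s then dropCut s tl else p :: tl

-- _sub_one's cutting loop over the remaining list
def cutWalk (cur e : Int) : List (Int × Int) → List (Int × Int)
  | [] => if cur < e then [(cur, e)] else []
  | (bs, be) :: tl =>
    if cur ≥ e then []
    else if bs ≥ e then [(cur, e)]
    else (if bs > cur then [(cur, bs)] else []) ++ cutWalk (max cur be) e tl

def subOne (s e : Int) (mb : List (Int × Int)) : List (Int × Int) :=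
  cutWalk s e (dropCut s mb)

-- the fused streaming pass over sorted(a)
def fuseLoop (mb : List (Int × Int)) (cur : Int × Int) : List (Int × Int) → List (Int × Int)
  | [] => subOne cur.1 cur.2 mb
  | p :: tl =>
    if p.1 ≤ cur.2 then fuseLoop mb (cur.1, max cur.2 p.2) tl
    else subOne cur.1 cur.2 mb ++ fuseLoop mb p tl

def subtract_intervals_alt (a : List (Int × Int)) (b : List (Int × Int)) : List (Int × Int) :=
  match PySem.List.sorted2 a (fun x => x.1) (fun x => x.2) false with
  | [] => []
  | h :: t => fuseLoop (merge_alt b) h t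

-- ===== PRECONDITION & SPEC =====
def Spec_subtract_intervals (a : List (Int × Int)) (b : List (Int × Int)) (out : List (Int × Int)) : Prop := out = subtract_intervals_alt a b
instance (a : List (Int × Int)) (b : List (Int × Int)) (out : List (Int × Int)) : Decidable (Spec_subtract_intervals a b out) := by unfold Spec_subtract_intervals; infer_instance

-- ===== CLAIM (what is proved, stated in full; the proofs are below) =====
def Claim_equal_subtract_intervals : Prop := ∀ (a : List (Int × Int)) (b : List (Int × Int)), Dom_subtract_intervals a b → Spec_subtract_intervals a b (subtract_intervals a b)

-- ===== LEMMAS AND PROOFS =====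

-- Python's lexicographic `<` on int pairs (the comparison sorted2 uses)
def lexb (p q : Int × Int) : Bool :=
  decide (p.1 < q.1) || !decide (q.1 < p.1) && decide (p.2 < q.2)

theorem sorted2_eq_foldl (xs : List (Int × Int)) :
    PySem.List.sorted2 xs (fun x => x.1) (fun x => x.2) false
      = xs.foldl (fun acc x => PySem.List.insertBy lexb x acc) [] := by
  rfl

theorem insertBy_pairwise (x : Int × Int) (l : List (Int × Int))
    (h : l.Pairwise (fun p q => p.1 ≤ q.1)) :
    (PySem.List.insertBy lexb x l).Pairwise (fun p q => p.1 ≤ q.1) := by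
  induction l with
  | nil => simp [PySem.List.insertBy]
  | cons y ys ih =>
    rcases List.pairwise_cons.mp h with ⟨hy, hys⟩
    rw [PySem.List.insertBy]
    by_cases hb : lexb x y = true
    · simp only [hb, if_pos]
      refine List.pairwise_cons.mpr ⟨?_, h⟩
      intro z hz
      have hxy : x.1 ≤ y.1 := by
        simp [lexb] at hb; omega
      rcases List.mem_cons.mp hz with rfl | hz
      · exact hxy
      · exact le_trans hxy (hy z hz)
    · simp only [hb, if_neg, Bool.false_eq_true, not_false_iff]
      refine List.pairwise_cons.mpr ⟨?_, ih hys⟩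
      intro z hz
      rcases (PySem.List.mem_insertBy lexb x z ys).mp hz with rfl | hz
      · simp [lexb] at hb; omega
      · exact hy z hz

theorem foldl_insertBy_pairwise (l acc : List (Int × Int))
    (h : acc.Pairwise (fun p q => p.1 ≤ q.1)) :
    (l.foldl (fun acc x => PySem.List.insertBy lexb x acc) acc).Pairwise
      (fun p q => p.1 ≤ q.1) := by
  induction l generalizing acc with
  | nil => simpa using h
  | cons x xs ih => exact ih _ (insertBy_pairwise x acc h)

theorem mergeRec_start_mem (t : List (Int × Int)) (h : Int × Int) :
    ∀ p ∈ mergeRec h t, p.1 = h.1 ∨ p.1 ∈ t.map (fun q => q.1) := by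
  induction t generalizing h with
  | nil => simp [mergeRec]
  | cons p tl ih =>
    intro q hq
    rw [mergeRec] at hq
    by_cases hb : p.1 ≤ h.2
    · simp only [hb, if_pos] at hq
      rcases ih _ q hq with h1 | h1
      · left; exact h1
      · right; simp [h1]
    · simp only [hb, if_neg, not_false_iff] at hq
      rcases List.mem_cons.mp hq with rfl | hq
      · left; rfl
      · rcases ih _ q hq with h1 | h1
        · right; simp [h1]
        · right; simp [h1]

theorem mergeRec_pairwise (t : List (Int × Int)) (h : Int × Int)
    (hp : (h :: t).Pairwise (fun p q => p.1 ≤ q.1)) :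
    (mergeRec h t).Pairwise (fun p q => p.1 ≤ q.1) := by
  induction t generalizing h with
  | nil => simp [mergeRec]
  | cons p tl ih =>
    rcases List.pairwise_cons.mp hp with ⟨hh, hp'⟩
    rcases List.pairwise_cons.mp hp' with ⟨hpq, htl⟩
    rw [mergeRec]
    by_cases hb : p.1 ≤ h.2
    · simp only [hb, if_pos]
      refine ih (h.1, max h.2 p.2) (List.pairwise_cons.mpr ⟨?_, htl⟩)
      intro q hq
      exact hh q (List.mem_cons_of_mem _ hq)
    · simp only [hb, if_neg, not_false_iff]
      refine List.pairwise_cons.mpr ⟨?_, ih p (List.pairwise_cons.mpr ⟨hpq, htl⟩)⟩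
      intro q hq
      rcases mergeRec_start_mem tl p q hq with h1 | h1
      · rw [h1]; exact hh p List.mem_cons_self
      · rcases List.mem_map.mp h1 with ⟨r, hr, hr1⟩
        rw [← hr1]; exact hh r (List.mem_cons_of_mem _ hr)

-- merged-output starts are nondecreasing
theorem merge_alt_pairwise (l : List (Int × Int)) :
    (merge_alt l).Pairwise (fun p q => p.1 ≤ q.1) := by
  have hs : (PySem.List.sorted2 l (fun x => x.1) (fun x => x.2) false).Pairwise
      (fun p q => p.1 ≤ q.1) := by
    rw [sorted2_eq_foldl]
    exact foldl_insertBy_pairwise l [] (List.Pairwise.nil)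
  unfold merge_alt
  cases h : PySem.List.sorted2 l (fun x => x.1) (fun x => x.2) false with
  | nil => exact List.Pairwise.nil
  | cons hd t =>
    rw [h] at hs
    exact mergeRec_pairwise t hd hs

-- A's merge = B's merge
theorem mergeLoop_eq (t acc : List (Int × Int)) (h : Int × Int) :
    pyMergeLoop (acc ++ [h]) t = acc ++ mergeRec h t := by
  induction t generalizing acc h with
  | nil => simp [pyMergeLoop, mergeRec]
  | cons p tl ih =>
    obtain ⟨s, e⟩ := p
    rw [pyMergeLoop, mergeRec]
    have h1 : (acc ++ [h]).getLastD (0, 0) = h := by simp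
    have h2 : (acc ++ [h]).dropLast = acc := by simp
    rw [h1, h2]
    by_cases hb : s ≤ h.2
    · simp only [hb, if_pos]
      exact ih acc (h.1, max h.2 e)
    · simp only [hb, if_neg, not_false_iff]
      have := ih (acc ++ [h]) (s, e)
      rw [List.append_assoc] at this
      simpa using this

theorem merge_eq (l : List (Int × Int)) : merge_intervals l = merge_alt l := by
  by_cases hl : l = []
  · subst hl
    have : PySem.List.sorted2 ([] : List (Int × Int)) (fun x => x.1) (fun x => x.2) false = [] := rfl
    simp [merge_intervals, merge_alt, this]
  · unfold merge_intervals merge_alt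
    simp only [hl, if_neg, not_false_iff]
    cases h : PySem.List.sorted2 l (fun x => x.1) (fun x => x.2) false with
    | nil => rfl
    | cons hd t =>
      have := mergeLoop_eq t [] hd
      simpa using this

-- B's fused pass = merge then per-interval subtraction
theorem fuseLoop_eq (mb : List (Int × Int)) (t : List (Int × Int)) (h : Int × Int) :
    fuseLoop mb h t = (mergeRec h t).flatMap (fun p => subOne p.1 p.2 mb) := by
  induction t generalizing h with
  | nil => simp [fuseLoop, mergeRec]
  | cons p tl ih =>
    rw [fuseLoop, mergeRec]
    by_cases hb : p.1 ≤ h.2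
    · simp only [hb, if_pos]
      exact ih (h.1, max h.2 p.2)
    · simp only [hb, if_neg, not_false_iff]
      rw [ih p, List.flatMap_cons]

theorem cutWalk_of_ge (cur e : Int) (l : List (Int × Int)) (h : cur ≥ e) :
    cutWalk cur e l = [] := by
  cases l with
  | nil => rw [cutWalk]; simp; omega
  | cons p tl =>
    obtain ⟨bs, be⟩ := p
    rw [cutWalk]
    simp only [h, if_pos]

-- A's k-loop (with the trailing `if cur < e` append) = B's cut walk
theorem kLoop_eq (b : List (Int × Int)) (k : Nat) (cur e : Int) (out : List (Int × Int)) :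
    (if (pyKLoop b k cur e out).1 < e
      then (pyKLoop b k cur e out).2 ++ [((pyKLoop b k cur e out).1, e)]
      else (pyKLoop b k cur e out).2)
      = out ++ cutWalk cur e (b.drop k) := by
  fun_induction pyKLoop b k cur e out with
  | case1 k cur out h bs be out1 cur1 hge =>
    have hgd : b.getD k (0, 0) = b[k] := List.getD_eq_getElem b (0, 0) h.1
    have hk : b.drop k = (bs, be) :: b.drop (k + 1) := by
      rw [List.drop_eq_getElem_cons h.1]
      congr 1
      rw [← hgd]
    rw [if_neg (not_lt.mpr hge), hk, cutWalk]
    have hbse : bs < e := h.2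
    by_cases hc : cur ≥ e
    · rw [if_pos hc]
      have hbs : ¬ bs > cur := by omega
      show (if bs > cur then out ++ [(cur, min bs e)] else out) = out ++ []
      rw [if_neg hbs, List.append_nil]
    · rw [if_neg hc, if_neg (show ¬ bs ≥ e by omega),
        cutWalk_of_ge (max cur be) e _ hge]
      by_cases hbs : bs > cur
      · show (if bs > cur then out ++ [(cur, min bs e)] else out) = _
        rw [if_pos hbs, show min bs e = bs by omega]
        have h2 : e ≤ max cur be := hge
        rw [le_max_iff] at h2
        simp
        omega
      · show (if bs > cur then out ++ [(cur, min bs e)] else out) = _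
        rw [if_neg hbs]
        have h2 : e ≤ max cur be := hge
        rw [le_max_iff] at h2
        simp
        omega
  | case2 k cur out h bs be out1 cur1 hge ih =>
    have hgd : b.getD k (0, 0) = b[k] := List.getD_eq_getElem b (0, 0) h.1
    have hk : b.drop k = (bs, be) :: b.drop (k + 1) := by
      rw [List.drop_eq_getElem_cons h.1]
      congr 1
      rw [← hgd]
    rw [ih, hk, cutWalk]
    have hbse : bs < e := h.2
    have hmax : cur ≤ max cur be := le_max_left _ _
    have h1 : ¬ max cur be ≥ e := hge
    rw [if_neg (show ¬ cur ≥ e by omega), if_neg (show ¬ bs ≥ e by omega)]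
    by_cases hbs : bs > cur
    · show (if bs > cur then out ++ [(cur, min bs e)] else out) ++ _ = _
      rw [if_pos hbs, show min bs e = bs by omega]
      simp
      rw [if_pos hbs]
      rfl
    · show (if bs > cur then out ++ [(cur, min bs e)] else out) ++ _ = _
      rw [if_neg hbs]
      simp
      rw [if_neg hbs]
      rfl
  | case3 k cur out h =>
    by_cases h1 : k < b.length
    · have hbse : ¬ (b.getD k (0, 0)).1 < e := fun hx => h ⟨h1, hx⟩
      have hgd : b.getD k (0, 0) = b[k] := List.getD_eq_getElem b (0, 0) h1
      have hk : b.drop k = ((b.getD k (0, 0)).1, (b.getD k (0, 0)).2) :: b.drop (k + 1) := by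
        rw [List.drop_eq_getElem_cons h1]
        congr 1
        rw [← hgd]
      rw [hk, cutWalk]
      by_cases hc : cur ≥ e
      · rw [if_pos hc, if_neg (show ¬ cur < e by omega), List.append_nil]
      · rw [if_neg hc, if_pos (show (b.getD k (0, 0)).1 ≥ e by omega),
          if_pos (show cur < e by omega)]
    · have hnil : b.drop k = [] := List.drop_eq_nil_of_le (by omega)
      rw [hnil, cutWalk]
      by_cases hc : cur < e
      · rw [if_pos hc, if_pos hc]
      · rw [if_neg hc, if_neg hc, List.append_nil]

theorem jLoop_drop (b : List (Int × Int)) (j : Nat) (cur : Int) :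
    b.drop (pyJLoop b j cur) = dropCut cur (b.drop j) := by
  fun_induction pyJLoop b j cur with
  | case1 j h ih =>
    have hgd : b.getD j (0, 0) = b[j] := List.getD_eq_getElem b (0, 0) h.1
    have hk : b.drop j = ((b.getD j (0, 0)).1, (b.getD j (0, 0)).2) :: b.drop (j + 1) := by
      rw [List.drop_eq_getElem_cons h.1]
      congr 1
      rw [← hgd]
    rw [ih, hk, dropCut, if_pos h.2]
  | case2 j h =>
    by_cases h1 : j < b.length
    · have h2 : ¬ (b.getD j (0, 0)).2 ≤ cur := fun hx => h ⟨h1, hx⟩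
      have hgd : b.getD j (0, 0) = b[j] := List.getD_eq_getElem b (0, 0) h1
      have hk : b.drop j = ((b.getD j (0, 0)).1, (b.getD j (0, 0)).2) :: b.drop (j + 1) := by
        rw [List.drop_eq_getElem_cons h1]
        congr 1
        rw [← hgd]
      rw [hk, dropCut, if_neg h2]
    · have hnil : b.drop j = [] := List.drop_eq_nil_of_le (by omega)
      rw [hnil, dropCut]

theorem jLoop_take (b : List (Int × Int)) (j : Nat) (cur : Int)
    (h : ∀ p ∈ b.take j, p.2 ≤ cur) :
    ∀ p ∈ b.take (pyJLoop b j cur), p.2 ≤ cur := by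
  revert h
  fun_induction pyJLoop b j cur with
  | case1 j hc ih =>
    intro h
    apply ih
    intro p hp
    rw [List.take_succ] at hp
    rcases List.mem_append.mp hp with hp | hp
    · exact h p hp
    · have hgd : b.getD j (0, 0) = b[j] := List.getD_eq_getElem b (0, 0) hc.1
      have : b[j]? = some b[j] := List.getElem?_eq_getElem hc.1
      rw [this] at hp
      simp only [Option.toList_some, List.mem_singleton] at hp
      rw [hp, ← hgd]
      exact hc.2
  | case2 j hc =>
    intro h
    exact h

theorem dropCut_prefix (b : List (Int × Int)) (j : Nat) (cur : Int)
    (h : ∀ p ∈ b.take j, p.2 ≤ cur) :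
    dropCut cur (b.drop j) = dropCut cur b := by
  induction j generalizing b with
  | zero => rfl
  | succ j ih =>
    cases b with
    | nil => rfl
    | cons p bt =>
      have hp : p.2 ≤ cur := h p (by simp [List.take_succ_cons])
      have ht : ∀ q ∈ bt.take j, q.2 ≤ cur := by
        intro q hq
        exact h q (by simp [List.take_succ_cons, hq])
      show dropCut cur (bt.drop j) = dropCut cur (p :: bt)
      rw [ih bt ht]
      obtain ⟨p1, p2⟩ := p
      rw [dropCut, if_pos hp]

theorem aLoop_eq (mb : List (Int × Int)) (ar : List (Int × Int)) (j : Nat)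
    (out : List (Int × Int))
    (hpre : ∀ p ∈ mb.take j, ∀ q ∈ ar, p.2 ≤ q.1)
    (hsort : ar.Pairwise (fun p q => p.1 ≤ q.1)) :
    pyALoop mb ar j out = out ++ ar.flatMap (fun p => subOne p.1 p.2 mb) := by
  induction ar generalizing j out with
  | nil => simp [pyALoop]
  | cons p tl ih =>
    obtain ⟨s, e⟩ := p
    rcases List.pairwise_cons.mp hsort with ⟨hhd, htl⟩
    have hts : ∀ q ∈ mb.take j, q.2 ≤ s := fun q hq => hpre q hq (s, e) List.mem_cons_self
    have hdrop : mb.drop (pyJLoop mb j s) = dropCut s mb := by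
      rw [jLoop_drop]
      exact dropCut_prefix mb j s hts
    have hkeq := kLoop_eq mb (pyJLoop mb j s) s e out
    rw [hdrop] at hkeq
    have hpre' : ∀ q ∈ mb.take (pyJLoop mb j s), ∀ r ∈ tl, q.2 ≤ r.1 := by
      intro q hq r hr
      have h1 : q.2 ≤ s := jLoop_take mb j s hts q hq
      exact le_trans h1 (hhd r hr)
    show pyALoop mb ((s, e) :: tl) j out = _
    rw [pyALoop]
    rw [ih (pyJLoop mb j s) _ hpre' htl, hkeq, List.flatMap_cons, List.append_assoc]
    rfl
-- ===== VERDICT (by name: the statement is the Claim_ definition above) =====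
theorem subtract_intervals_spec : Claim_equal_subtract_intervals := by
  intro a b _
  unfold Spec_subtract_intervals
  unfold subtract_intervals
  rw [merge_eq a, merge_eq b,
    aLoop_eq (merge_alt b) (merge_alt a) 0 [] (by simp) (merge_alt_pairwise a),
    List.nil_append]
  unfold subtract_intervals_alt merge_alt
  cases hs : PySem.List.sorted2 a (fun x => x.1) (fun x => x.2) false with
  | nil => rfl
  | cons h t =>
    dsimp only
    rw [fuseLoop_eq]
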